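-- pv_equiv track=rewrite | github.com/0ki/paradox | combus.py | bcd
-- ===== SOURCE A (Python) =====
-- def bcd(binary):
-- 	r=""
-- 	for sym in binary:
-- 		for val in (sym >> 4, sym & 0xf):
-- 			if val==0:
-- 				return r
-- 			r=r+str(val%10) #amazing "encryption"
-- 	return r
-- ===== SOURCE B (Python) =====
-- def bcd(binary):
--     # Stage 1: locate the position of the first zero nibble in the flattened
--     # nibble stream (2*len(binary) if there is none).
--     stop = 2 * len(binary)
--     for i, sym in enumerate(binary):
--         if sym >> 4 == 0:
--             stop = 2 * i
--             break
--         if sym & 0xf == 0: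
--             stop = 2 * i + 1
--             break
--     # Stage 2: rebuild the digit string by random access via index arithmetic:
--     # nibble k lives in byte k//2, high half if k is even.
--     return ''.join(
--         str(((binary[k // 2] >> 4) if k % 2 == 0 else (binary[k // 2] & 0xf)) % 10)
--         for k in range(stop))
-- ===== Notes on version B (the rewrite author's own statement) =====
-- stated objective: alternative
-- what changed: Instead of one pass accumulating digits until a zero nibble, B first computes the cut position (index of the first zero nibble in the flattened nibble stream) and then reconstructs the digit string by random-access index arithmetic (nibble k = byte k//2, high/low by parity) over range(stop).
import Mathlib
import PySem

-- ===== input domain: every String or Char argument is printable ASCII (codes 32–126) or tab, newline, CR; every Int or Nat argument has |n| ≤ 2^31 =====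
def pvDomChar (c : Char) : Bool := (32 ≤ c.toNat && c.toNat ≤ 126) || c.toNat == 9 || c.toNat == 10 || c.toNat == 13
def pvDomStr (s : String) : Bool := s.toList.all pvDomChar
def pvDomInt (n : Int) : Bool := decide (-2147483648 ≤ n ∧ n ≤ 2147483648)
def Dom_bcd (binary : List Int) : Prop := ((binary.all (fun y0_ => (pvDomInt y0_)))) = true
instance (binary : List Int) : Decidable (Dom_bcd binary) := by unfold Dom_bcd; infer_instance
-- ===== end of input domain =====

-- B replaces A's single accumulating pass (append digits until a zero nibble, early return)
-- by two stages: first find the cut position of the first zero nibble in the flattened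
-- nibble stream, then rebuild the digit string by random-access index arithmetic (alternative; same cost).

-- ===== PORT A =====
-- loop over the bytes carrying the accumulator r; the inner two-element loop over
-- (sym >> 4, sym & 0xf) is unrolled exactly as written, each value with its early return.
def bcdLoop : List Int → String → String
  | [], r => r
  | sym :: rest, r =>
    let v1 := PySem.Int.floordiv sym 16       -- sym >> 4 (arithmetic shift = floor division by 16)
    if v1 = 0 then r
    else
      let r1 := r ++ PySem.Int.toStr (PySem.Int.mod v1 10)
      let v2 := PySem.Int.mod sym 16          -- sym & 0xf (= Python sym % 16)
      if v2 = 0 then r1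
      else bcdLoop rest (r1 ++ PySem.Int.toStr (PySem.Int.mod v2 10))

def bcd (binary : List Int) : String := bcdLoop binary ""

-- ===== PORT B =====
-- stage 1 of Source B: the enumerate/break loop locating the first zero nibble
def bcdFindStop : List Int → Int → Int
  | [], i => 2 * i                                  -- loop ended: stop keeps its initial value 2*len(binary)
  | sym :: rest, i =>
    if PySem.Int.floordiv sym 16 = 0 then 2 * i     -- sym >> 4 == 0: stop = 2*i
    else if PySem.Int.mod sym 16 = 0 then 2 * i + 1 -- sym & 0xf == 0: stop = 2*i+1
    else bcdFindStop rest (i + 1)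

-- nibble k of the stream: byte k//2, high half if k even (the indexing expression of Source B;
-- pyGetD's default is never reached: k < stop keeps k//2 in range)
def bcdNib (binary : List Int) (k : Int) : Int :=
  if PySem.Int.mod k 2 = 0
  then PySem.Int.floordiv (PySem.List.pyGetD binary (PySem.Int.floordiv k 2) 0) 16
  else PySem.Int.mod (PySem.List.pyGetD binary (PySem.Int.floordiv k 2) 0) 16

def bcd_alt (binary : List Int) : String :=
  let stop := bcdFindStop binary 0
  PySem.Str.join "" ((PySem.List.pyRange 0 stop 1).map
    (fun k => PySem.Int.toStr (PySem.Int.mod (bcdNib binary k) 10)))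

-- ===== PRECONDITION & SPEC =====
def Spec_bcd (binary : List Int) (out : String) : Prop := out = bcd_alt binary
instance (binary : List Int) (out : String) : Decidable (Spec_bcd binary out) := by unfold Spec_bcd; infer_instance

-- ===== CLAIM (what is proved, stated in full; the proofs are below) =====
def Claim_equal_bcd : Prop := ∀ (binary : List Int), Dom_bcd binary → Spec_bcd binary (bcd binary)

-- ===== LEMMAS AND PROOFS =====

-- the flattened nibble stream and the digit-string pipeline, common reference point
def bcdNibs (binary : List Int) : List Int :=
  binary.flatMap (fun sym => [PySem.Int.floordiv sym 16, PySem.Int.mod sym 16])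

def bcdPipe (binary : List Int) : String :=
  PySem.Str.join "" (((bcdNibs binary).takeWhile (fun v => v ≠ 0)).map
    (fun v => PySem.Int.toStr (PySem.Int.mod v 10)))

theorem chars_join_empty_cons (cs : List Char) (l : List (List Char)) :
    PySem.Chars.join [] (cs :: l) = cs ++ PySem.Chars.join [] l := by
  cases l with
  | nil => simp [PySem.Chars.join_singleton, PySem.Chars.join_nil]
  | cons t ts => simp [PySem.Chars.join_cons_cons]

theorem join_empty_cons (s : String) (l : List String) :
    PySem.Str.join "" (s :: l) = s ++ PySem.Str.join "" l := by
  simp [PySem.Str.join, chars_join_empty_cons]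

-- A's accumulator loop appends exactly the pipeline output to r
theorem bcdLoop_eq (binary : List Int) (r : String) :
    bcdLoop binary r = r ++ bcdPipe binary := by
  induction binary generalizing r with
  | nil => simp [bcdLoop, bcdPipe, bcdNibs, PySem.Str.join, PySem.Chars.join_nil]
  | cons sym rest ih =>
    by_cases h1 : sym / 16 = 0
    · simp [bcdLoop, bcdPipe, bcdNibs, h1, PySem.Str.join, PySem.Chars.join_nil]
    · by_cases h2 : (16:ℤ) ∣ sym
      · simp [bcdLoop, bcdPipe, bcdNibs, h1, h2, join_empty_cons, PySem.Str.join,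
          PySem.Chars.join_nil, ← PySem.Int.toList_toStr]
      · simp [bcdLoop, bcdPipe, bcdNibs, h1, h2, join_empty_cons, ih, String.append_assoc]

-- stage 1 computes 2*i plus the length of the zero-free nibble prefix
theorem bcdFindStop_eq (binary : List Int) (i : Int) :
    bcdFindStop binary i
      = 2 * i + (((bcdNibs binary).takeWhile (fun v => v ≠ 0)).length : Int) := by
  induction binary generalizing i with
  | nil => simp [bcdFindStop, bcdNibs]
  | cons sym rest ih =>
    by_cases h1 : sym / 16 = 0
    · simp [bcdFindStop, bcdNibs, h1]
    · by_cases h2 : (16:ℤ) ∣ sym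
      · simp [bcdFindStop, bcdNibs, h1, h2]
      · simp [bcdFindStop, bcdNibs, h1, h2, ih]
        push_cast
        ring

-- the indexing expression reproduces the nibble stream at every in-range Nat index
theorem bcdNib_eq (binary : List Int) (k : ℕ) (hk : k < (bcdNibs binary).length) :
    bcdNib binary (k : Int) = (bcdNibs binary).getD k 0 := by
  induction binary generalizing k with
  | nil => simp [bcdNibs] at hk
  | cons sym rest ih =>
    match k with
    | 0 => simp [bcdNib, bcdNibs, PySem.Int.mod, PySem.Int.floordiv]
    | 1 =>
      simp [bcdNib, bcdNibs]
    | (m + 2) =>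
      have hrest : m < (bcdNibs rest).length := by
        simp [bcdNibs] at hk ⊢; omega
      have h1 : PySem.Int.mod ((m : Int) + 2) 2 = PySem.Int.mod (m : Int) 2 := by
        have := PySem.Int.mod_natCast (m + 2) 2
        have := PySem.Int.mod_natCast m 2
        push_cast at *
        omega
      have h2 : PySem.Int.floordiv ((m : Int) + 2) 2 = PySem.Int.floordiv (m : Int) 2 + 1 := by
        have := PySem.Int.floordiv_natCast (m + 2) 2
        have := PySem.Int.floordiv_natCast m 2
        push_cast at *
        omega
      have h3 : PySem.Int.floordiv (m : Int) 2 = ((m / 2 : ℕ) : Int) :=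
        PySem.Int.floordiv_natCast m 2
      have hget : PySem.List.pyGetD (sym :: rest) (((m / 2 : ℕ) : Int) + 1) 0
          = PySem.List.pyGetD rest ((m / 2 : ℕ) : Int) 0 := by
        have hc : (((m / 2 : ℕ) : Int) + 1) = ((m / 2 + 1 : ℕ) : Int) := by push_cast; ring
        rw [hc, PySem.List.pyGetD_natCast, PySem.List.pyGetD_natCast]
        simp
      have lhs_eq : bcdNib (sym :: rest) ((m + 2 : ℕ) : Int) = bcdNib rest (m : Int) := by
        simp only [bcdNib]
        push_cast
        rw [h1, h2, h3, hget, ← h3]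
      rw [lhs_eq, ih m hrest]
      simp [bcdNibs]

theorem range_map_getD (l : List Int) (t : ℕ) (ht : t ≤ l.length) :
    (List.range t).map (fun k => l.getD k 0) = l.take t := by
  apply List.ext_getElem
  · simp; omega
  · intro i hi1 hi2
    simp only [List.getElem_map, List.getElem_range, List.getElem_take]
    rw [List.getD_eq_getElem]

theorem bcd_alt_eq_pipe (binary : List Int) : bcd_alt binary = bcdPipe binary := by
  have htle : ((bcdNibs binary).takeWhile (fun v => v ≠ 0)).length ≤ (bcdNibs binary).length :=
    (List.takeWhile_prefix _).length_le
  have htw : (bcdNibs binary).takeWhile (fun v => v ≠ 0)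
      = (bcdNibs binary).take ((bcdNibs binary).takeWhile (fun v => v ≠ 0)).length :=
    List.prefix_iff_eq_take.mp (List.takeWhile_prefix _)
  unfold bcd_alt
  rw [bcdFindStop_eq binary 0]
  rw [show (2 * (0:Int) + (((bcdNibs binary).takeWhile (fun v => v ≠ 0)).length : Int))
      = (((bcdNibs binary).takeWhile (fun v => v ≠ 0)).length : Int) from by ring]
  simp only []
  rw [PySem.List.pyRange_one]
  simp only [sub_zero, Int.toNat_natCast, zero_add, List.map_map]
  unfold bcdPipe
  congr 1
  conv_rhs => rw [htw, ← range_map_getD (bcdNibs binary)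
    ((bcdNibs binary).takeWhile (fun v => v ≠ 0)).length htle]
  rw [List.map_map]
  apply List.map_congr_left
  intro k hk
  simp only [Function.comp_apply]
  rw [bcdNib_eq binary k (lt_of_lt_of_le (List.mem_range.mp hk) htle)]

-- ===== VERDICT (by name: the statement is the Claim_ definition above) =====
theorem bcd_spec : Claim_equal_bcd := by
  intro binary _
  show bcd binary = bcd_alt binary
  rw [bcd_alt_eq_pipe]
  simpa using bcdLoop_eq binary ""
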